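-- pv_equiv track=rewrite | github.com/OlgaOmel/vk_hw_2 | Деревья_1/max_min_multplication.py | max_min_multplication
-- ===== SOURCE A (Python) =====
-- def max_min_multplication(arr):
--     if len(arr) < 3:
--         return -1
--
--     min_index = 1
--     max_index = 2
--
--     i = min_index
--     while True:
--         min_index_tmp = 2 * i + 1
--         if min_index_tmp < len(arr):
--             min_index = min_index_tmp
--             i = min_index_tmp
--             continue
--         break
--
--     i = max_index
--     while True:
--         max_index_tmp = 2 * i + 2
--         if max_index_tmp < len(arr):
--             max_index = max_index_tmp
--             i = max_index_tmp
--             continue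
--         break
--
--     result = arr[min_index] * arr[max_index]
--     return result
-- ===== SOURCE B (Python) =====
-- def max_min_multplication(arr):
--     if len(arr) < 3:
--         return -1
--     n = len(arr)
--     min_index = (1 << (n.bit_length() - 1)) - 1
--     max_index = (1 << ((n + 1).bit_length() - 1)) - 2
--     return arr[min_index] * arr[max_index]
-- ===== Notes on version B (the rewrite author's own statement) =====
-- stated objective: simpler
-- what changed: Replaces the two while-loops walking the leftmost/rightmost heap paths with closed-form bit_length formulas for the two leaf indices.
import Mathlib
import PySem

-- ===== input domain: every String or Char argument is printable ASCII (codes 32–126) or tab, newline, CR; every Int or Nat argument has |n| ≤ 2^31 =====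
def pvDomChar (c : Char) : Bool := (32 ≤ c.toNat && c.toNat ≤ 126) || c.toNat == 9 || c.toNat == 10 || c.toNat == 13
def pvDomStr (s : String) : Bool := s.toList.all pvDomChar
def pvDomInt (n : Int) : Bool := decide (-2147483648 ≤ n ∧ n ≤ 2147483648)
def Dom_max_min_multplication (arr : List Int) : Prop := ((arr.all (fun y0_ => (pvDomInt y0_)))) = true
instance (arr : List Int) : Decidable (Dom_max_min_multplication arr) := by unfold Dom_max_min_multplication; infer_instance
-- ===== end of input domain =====

-- B replaces A's two path-walking while-loops by closed-form bit_length formulas for the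
-- leftmost- and rightmost-leaf indices (objective: simpler, loop-free index computation).

-- ===== PORT A =====
-- first while-loop: follow left children from i while 2*i+1 < n
def pvClimbMin (n i : Nat) : Nat :=
  if 2 * i + 1 < n then pvClimbMin n (2 * i + 1) else i
termination_by n - i
decreasing_by omega

-- second while-loop: follow right children from i while 2*i+2 < n
def pvClimbMax (n i : Nat) : Nat :=
  if 2 * i + 2 < n then pvClimbMax n (2 * i + 2) else i
termination_by n - i
decreasing_by omega

def max_min_multplication (arr : List Int) : Int :=
  if arr.length < 3 then -1
  else
    let minIndex : Nat := pvClimbMin arr.length 1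
    let maxIndex : Nat := pvClimbMax arr.length 2
    (PySem.List.pyGet? arr (minIndex : Int)).getD 0 *
      (PySem.List.pyGet? arr (maxIndex : Int)).getD 0

-- ===== PORT B =====
-- n.bit_length() for n ≥ 1 is exactly Nat.log2 n + 1 (here n ≥ 3, so this is exact)
def max_min_multplication_alt (arr : List Int) : Int :=
  if arr.length < 3 then -1
  else
    let n := arr.length
    let minIndex : Nat := 2 ^ ((Nat.log2 n + 1) - 1) - 1
    let maxIndex : Nat := 2 ^ ((Nat.log2 (n + 1) + 1) - 1) - 2
    (PySem.List.pyGet? arr (minIndex : Int)).getD 0 *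
      (PySem.List.pyGet? arr (maxIndex : Int)).getD 0

-- ===== PRECONDITION & SPEC =====
def Spec_max_min_multplication (arr : List Int) (out : Int) : Prop := out = max_min_multplication_alt arr
instance (arr : List Int) (out : Int) : Decidable (Spec_max_min_multplication arr out) := by unfold Spec_max_min_multplication; infer_instance

-- ===== CLAIM (what is proved, stated in full; the proofs are below) =====
def Claim_equal_max_min_multplication : Prop := ∀ (arr : List Int), Dom_max_min_multplication arr → Spec_max_min_multplication arr (max_min_multplication arr)

-- ===== LEMMAS AND PROOFS =====

theorem pv_log2_eq (k n : Nat) (h1 : 2 ^ k ≤ n) (h2 : n < 2 ^ (k + 1)) : Nat.log2 n = k := by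
  rw [Nat.log2_eq_log_two]
  exact Nat.log_eq_of_pow_le_of_lt_pow h1 h2

theorem pvClimbMin_eq (n : Nat) :
    ∀ m k, n - 2 ^ k = m → 2 ^ k ≤ n →
      pvClimbMin n (2 ^ k - 1) = 2 ^ Nat.log2 n - 1 := by
  intro m
  induction m using Nat.strong_induction_on with
  | _ m ih =>
    intro k hm hk
    have hpow : 2 ^ (k + 1) = 2 * 2 ^ k := by rw [pow_succ]; ring
    have h1 : (1 : Nat) ≤ 2 ^ k := Nat.one_le_two_pow
    rw [pvClimbMin]
    have e : 2 * (2 ^ k - 1) + 1 = 2 ^ (k + 1) - 1 := by omega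
    rw [e]
    split_ifs with h
    · exact ih (n - 2 ^ (k + 1)) (by omega) (k + 1) rfl (by omega)
    · rw [pv_log2_eq k n hk (by omega)]

theorem pvClimbMax_eq (n : Nat) :
    ∀ m k, n + 1 - 2 ^ k = m → 1 ≤ k → 2 ^ k ≤ n + 1 →
      pvClimbMax n (2 ^ k - 2) = 2 ^ Nat.log2 (n + 1) - 2 := by
  intro m
  induction m using Nat.strong_induction_on with
  | _ m ih =>
    intro k hm hk1 hk
    have hpow : 2 ^ (k + 1) = 2 * 2 ^ k := by rw [pow_succ]; ring
    have h2 : (2 : Nat) ≤ 2 ^ k := by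
      calc (2 : Nat) = 2 ^ 1 := rfl
      _ ≤ 2 ^ k := Nat.pow_le_pow_right (by norm_num) hk1
    rw [pvClimbMax]
    have e : 2 * (2 ^ k - 2) + 2 = 2 ^ (k + 1) - 2 := by omega
    rw [e]
    split_ifs with h
    · exact ih (n + 1 - 2 ^ (k + 1)) (by omega) (k + 1) rfl (by omega) (by omega)
    · rw [pv_log2_eq k (n + 1) hk (by omega)]

-- ===== VERDICT (by name: the statement is the Claim_ definition above) =====
theorem max_min_multplication_spec : Claim_equal_max_min_multplication := by
  intro arr _
  unfold Spec_max_min_multplication max_min_multplication max_min_multplication_alt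
  split_ifs with h
  · rfl
  · have hmin : pvClimbMin arr.length 1 = 2 ^ Nat.log2 arr.length - 1 := by
      have := pvClimbMin_eq arr.length (arr.length - 2 ^ 1) 1 rfl (by omega)
      simpa using this
    have hmax : pvClimbMax arr.length 2 = 2 ^ Nat.log2 (arr.length + 1) - 2 := by
      have := pvClimbMax_eq arr.length (arr.length + 1 - 2 ^ 2) 2 rfl (by omega) (by omega)
      simpa using this
    simp only [hmin, hmax, Nat.add_sub_cancel]
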